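-- pv_equiv track=rewrite | github.com/sivamaran/quora_scraper | scraper_types/quora_scraper_meta.py | _external_links_from_hrefs
-- ===== SOURCE A (Python) =====
-- from typing import Dict, List, Optional
--
-- def _dedupe(seq: List[str]) -> List[str]:
--     seen, out = set(), []
--     for s in seq:
--         if s and s not in seen:
--             seen.add(s)
--             out.append(s)
--     return out
--
-- def _external_links_from_hrefs(hrefs: List[str]) -> List[str]:
--     """
--     Extract only true external links (exclude Quora internal links).
--     """
--     out = [
--         h for h in hrefs
--         if h
--         and h.startswith("http")
--         and "quora.com" not in h.lower()            # exclude all Quora internal links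
--         and "quorablog.quora.com" not in h.lower()  # exclude Quora blog
--     ]
--     return _dedupe(out)[:20]
-- ===== SOURCE B (Python) =====
-- from typing import List
--
-- def _external_links_from_hrefs(hrefs: List[str]) -> List[str]:
--     # Single fused pass: filter + dedupe + cap at 20, with early exit.
--     seen = set()
--     out = []
--     for h in hrefs:
--         if len(out) == 20:
--             break
--         if h.startswith("http") and "quora.com" not in h.lower() and h not in seen:
--             seen.add(h)
--             out.append(h)
--     return out
-- ===== Notes on version B (the rewrite author's own statement) =====
-- stated objective: simpler
-- what changed: Replaces the comprehension-filter + separate dedupe pass + trailing [:20] slice with one fused loop keeping a seen-set and output list, breaking as soon as 20 links are collected; the redundant 'quorablog.quora.com' and truthiness checks (both subsumed by the other conditions) are dropped.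
import Mathlib
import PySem

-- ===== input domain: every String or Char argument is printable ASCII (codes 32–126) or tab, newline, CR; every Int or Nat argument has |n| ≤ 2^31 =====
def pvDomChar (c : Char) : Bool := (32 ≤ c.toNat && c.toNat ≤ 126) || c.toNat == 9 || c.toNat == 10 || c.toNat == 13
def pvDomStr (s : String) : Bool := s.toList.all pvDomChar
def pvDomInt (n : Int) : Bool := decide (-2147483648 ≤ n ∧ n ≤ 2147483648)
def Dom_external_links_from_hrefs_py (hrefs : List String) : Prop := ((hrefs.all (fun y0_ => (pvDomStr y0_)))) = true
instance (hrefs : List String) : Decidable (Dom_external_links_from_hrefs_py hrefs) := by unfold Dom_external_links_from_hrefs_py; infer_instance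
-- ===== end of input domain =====

-- B fuses A's filter comprehension, separate dedupe pass and trailing [:20] slice into one
-- loop with a seen-set, cap 20 and early break (objective: simpler).

-- ===== PORT A =====
-- the comprehension's condition on one href
def pvPredA (h : String) : Bool :=
  decide (h ≠ "") && PySem.Str.startswith h "http"
    && !(PySem.Str.isIn "quora.com" (PySem.Str.lower h))
    && !(PySem.Str.isIn "quorablog.quora.com" (PySem.Str.lower h))

-- the loop of _dedupe
def pvDedupeAux (seen : PySem.Set String) (out : List String) : List String → List String
  | [] => out
  | s :: t =>
      if decide (s ≠ "") && !(PySem.Set.contains seen s) then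
        pvDedupeAux (PySem.Set.add seen s) (out ++ [s]) t
      else
        pvDedupeAux seen out t

def pvDedupe (seq : List String) : List String :=
  pvDedupeAux PySem.Set.empty [] seq

def external_links_from_hrefs_py (hrefs : List String) : List String :=
  PySem.List.slice (pvDedupe (hrefs.filter pvPredA)) none (some 20)

-- ===== PORT B =====
def pvPredB (h : String) : Bool :=
  PySem.Str.startswith h "http" && !(PySem.Str.isIn "quora.com" (PySem.Str.lower h))

-- B's single fused loop: cap check, then filter+dedupe test
def pvBLoop (seen : PySem.Set String) (out : List String) : List String → List String
  | [] => out
  | h :: t =>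
      if out.length = 20 then out
      else if pvPredB h && !(PySem.Set.contains seen h) then
        pvBLoop (PySem.Set.add seen h) (out ++ [h]) t
      else
        pvBLoop seen out t

def external_links_from_hrefs_py_alt (hrefs : List String) : List String :=
  pvBLoop PySem.Set.empty [] hrefs

-- ===== PRECONDITION & SPEC =====
def Spec_external_links_from_hrefs_py (hrefs : List String) (out : List String) : Prop := out = external_links_from_hrefs_py_alt hrefs
instance (hrefs : List String) (out : List String) : Decidable (Spec_external_links_from_hrefs_py hrefs out) := by unfold Spec_external_links_from_hrefs_py; infer_instance

-- ===== CLAIM (what is proved, stated in full; the proofs are below) =====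
def Claim_equal_external_links_from_hrefs_py : Prop := ∀ (hrefs : List String), Dom_external_links_from_hrefs_py hrefs → Spec_external_links_from_hrefs_py hrefs (external_links_from_hrefs_py hrefs)

-- ===== LEMMAS AND PROOFS =====

-- a string starting with "http" is nonempty
theorem pv_startswith_ne_empty {h : String} (hs : PySem.Str.startswith h "http" = true) :
    h ≠ "" := by
  intro he; subst he; exact absurd hs (by decide)

-- "quorablog.quora.com" in s implies "quora.com" in s
theorem pv_q_infix_qb : "quora.com".toList <:+: "quorablog.quora.com".toList := by decide

theorem pv_qb_imp_q {s : String}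
    (hb : PySem.Str.isIn "quorablog.quora.com" s = true) :
    PySem.Str.isIn "quora.com" s = true := by
  rw [PySem.Str.isIn_iff_infix] at hb
  rw [PySem.Str.isIn_iff_infix]
  exact List.IsInfix.trans pv_q_infix_qb hb

-- A's filter condition coincides with B's
theorem pvPredA_eq_pvPredB (h : String) : pvPredA h = pvPredB h := by
  by_cases he : h = ""
  · subst he; decide
  · unfold pvPredA pvPredB
    cases hq : PySem.Str.isIn "quora.com" (PySem.Str.lower h) with
    | false =>
        have hqb : PySem.Str.isIn "quorablog.quora.com" (PySem.Str.lower h) = false := by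
          cases hqb : PySem.Str.isIn "quorablog.quora.com" (PySem.Str.lower h) with
          | false => rfl
          | true =>
              rw [pv_qb_imp_q hqb] at hq
              exact Bool.noConfusion hq
        rw [hqb]; simp [he]
    | true => simp

-- accumulator lemma for A's dedupe loop
theorem pvDedupeAux_acc (l : List String) (seen : PySem.Set String) (out : List String) :
    pvDedupeAux seen out l = out ++ pvDedupeAux seen [] l := by
  induction l generalizing seen out with
  | nil => simp [pvDedupeAux]
  | cons s t ih =>
      by_cases hc : (decide (s ≠ "") && !(PySem.Set.contains seen s)) = true
      · rw [pvDedupeAux, pvDedupeAux, if_pos hc, if_pos hc, ih _ (out ++ [s]),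
          ih _ ([] ++ [s])]
        simp only [List.nil_append, List.append_assoc]
      · rw [pvDedupeAux, pvDedupeAux, if_neg hc, if_neg hc, ih]

-- main invariant: B's capped loop equals "append A's dedupe of the filtered tail, then take 20"
theorem pv_main (l : List String) (seen : PySem.Set String) (out : List String)
    (hlen : out.length ≤ 20) :
    pvBLoop seen out l = (out ++ pvDedupeAux seen [] (l.filter pvPredB)).take 20 := by
  induction l generalizing seen out with
  | nil =>
      simp [pvBLoop, pvDedupeAux, List.take_of_length_le hlen]
  | cons h t ih =>
      by_cases h20 : out.length = 20
      · rw [pvBLoop, if_pos h20]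
        have : (out ++ pvDedupeAux seen [] ((h :: t).filter pvPredB)).take 20 =
            (out ++ pvDedupeAux seen [] ((h :: t).filter pvPredB)).take out.length := by rw [h20]
        rw [this, List.take_left]
      · have hlt : out.length < 20 := lt_of_le_of_ne hlen h20
        rw [pvBLoop, if_neg h20]
        cases hp : pvPredB h
        · have hf : (h :: t).filter pvPredB = t.filter pvPredB := by
            simp [hp]
          rw [hf]
          simp only [Bool.false_and, if_neg (by simp : ¬ (false = true))]
          exact ih seen out hlen
        · have hne : h ≠ "" :=
            pv_startswith_ne_empty (by
              have := hp; simp only [pvPredB, Bool.and_eq_true] at this; exact this.1)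
          have hf : (h :: t).filter pvPredB = h :: t.filter pvPredB := by
            simp [hp]
          rw [hf]
          cases hc : PySem.Set.contains seen h
          · -- new element: both append h
            have hcondA : (decide (h ≠ "") && !(PySem.Set.contains seen h)) = true := by
              rw [hc]; simp [hne]
            rw [if_pos (by decide : (true && !false) = true), pvDedupeAux,
              if_pos hcondA, pvDedupeAux_acc]
            rw [ih (PySem.Set.add seen h) (out ++ [h])
              (by simp only [List.length_append, List.length_cons, List.length_nil]; omega)]
            simp only [List.nil_append, List.append_assoc]
          · -- already seen: both skip
            have hcondA : ¬((decide (h ≠ "") && !(PySem.Set.contains seen h)) = true) := by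
              rw [hc]; simp
            rw [if_neg (by decide : ¬((true && !true) = true)), pvDedupeAux, if_neg hcondA]
            exact ih seen out hlen

-- ===== VERDICT (by name: the statement is the Claim_ definition above) =====
theorem external_links_from_hrefs_py_spec : Claim_equal_external_links_from_hrefs_py := by
  intro hrefs _
  show external_links_from_hrefs_py hrefs = external_links_from_hrefs_py_alt hrefs
  rw [external_links_from_hrefs_py, external_links_from_hrefs_py_alt, pvDedupe]
  have hs : PySem.List.slice (pvDedupeAux PySem.Set.empty [] (hrefs.filter pvPredA)) none (some 20)
      = (pvDedupeAux PySem.Set.empty [] (hrefs.filter pvPredA)).take 20 := by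
    simp [pysem]
  rw [hs, List.filter_congr (fun x _ => pvPredA_eq_pvPredB x)]
  rw [pv_main hrefs PySem.Set.empty [] (by simp)]
  rw [List.nil_append]
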